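-- pv_equiv track=rewrite | github.com/sckwokyboom/Java-Inline-LoRA | scripts/make_codefix_dataset.py | _scan_parentheses_pairs
-- ===== SOURCE A (Python) =====
-- from typing import Dict, Iterable, List, Optional, Sequence, Set, Tuple
--
-- def _scan_parentheses_pairs(text: str) -> List[Tuple[int, int]]:
--     pairs: List[Tuple[int, int]] = []
--     stack: List[int] = []
--     in_single = False
--     in_double = False
--     escape = False
--
--     for idx, ch in enumerate(text):
--         if in_single or in_double:
--             if escape:
--                 escape = False
--                 continue
--             if ch == "\\":
--                 escape = True
--                 continue
--             if in_single and ch == "'":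
--                 in_single = False
--                 continue
--             if in_double and ch == '"':
--                 in_double = False
--                 continue
--             continue
--
--         if ch == "'":
--             in_single = True
--             continue
--         if ch == '"':
--             in_double = True
--             continue
--         if ch == "(":
--             stack.append(idx)
--             continue
--         if ch == ")":
--             if not stack:
--                 continue
--             open_idx = stack.pop()
--             pairs.append((open_idx, idx))
--     return pairs
-- ===== SOURCE B (Python) =====
-- def _scan_parentheses_pairs(text):
--     # Pass 1: lex string literals, building a per-position mask of "code" chars.
--     n = len(text)
--     mask = []
--     i = 0
--     while i < n:
--         ch = text[i]
--         mask.append(True)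
--         i += 1
--         if ch == "'" or ch == '"':
--             while i < n:
--                 c = text[i]
--                 if c == "\\":
--                     mask.append(False)
--                     if i + 1 < n:
--                         mask.append(False)
--                     i += 2
--                     continue
--                 mask.append(False)
--                 i += 1
--                 if c == ch:
--                     break
--     # Pass 2: match parentheses on code positions only.
--     pairs = []
--     stack = []
--     for i, (keep, ch) in enumerate(zip(mask, text)):
--         if keep:
--             if ch == "(":
--                 stack.append(i)
--             elif ch == ")":
--                 if stack:
--                     pairs.append((stack.pop(), i))
--     return pairs
-- ===== Notes on version B (the rewrite author's own statement) =====
-- stated objective: alternative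
-- what changed: Replaces A's single-pass five-flag state machine with two passes: a nested-while lexer that builds a boolean code-mask over string literals, then a separate stack pass matching parentheses only on masked-as-code positions.
import Mathlib
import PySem

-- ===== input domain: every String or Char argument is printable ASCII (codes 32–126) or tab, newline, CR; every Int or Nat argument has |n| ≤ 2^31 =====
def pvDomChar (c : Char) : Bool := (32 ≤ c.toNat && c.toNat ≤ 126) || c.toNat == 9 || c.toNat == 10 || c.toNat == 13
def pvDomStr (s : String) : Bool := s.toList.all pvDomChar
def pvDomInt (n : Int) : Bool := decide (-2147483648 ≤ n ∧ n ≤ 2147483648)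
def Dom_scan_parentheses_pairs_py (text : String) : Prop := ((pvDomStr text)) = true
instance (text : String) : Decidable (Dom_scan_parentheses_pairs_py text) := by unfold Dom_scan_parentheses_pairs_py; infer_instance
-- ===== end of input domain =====

-- B replaces A's single-pass five-flag state machine by two passes (a string-literal
-- lexer producing a code mask, then a stack pass over code positions); return values proved equal.

-- ===== PORT A =====
-- A's for-loop over enumerate(text): one recursive step per char, same state
-- (pairs, stack, in_single, in_double, escape), branches in A's order.
def pvLoopA (idx : Int) (pairs : List (Int × Int)) (stack : List Int)
    (insin indou esc : Bool) : List Char → List (Int × Int)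
  | [] => pairs
  | ch :: rest =>
    if insin || indou then
      if esc then pvLoopA (idx+1) pairs stack insin indou false rest
      else if ch = '\\' then pvLoopA (idx+1) pairs stack insin indou true rest
      else if insin ∧ ch = '\'' then pvLoopA (idx+1) pairs stack false indou esc rest
      else if indou ∧ ch = '"' then pvLoopA (idx+1) pairs stack insin false esc rest
      else pvLoopA (idx+1) pairs stack insin indou esc rest
    else if ch = '\'' then pvLoopA (idx+1) pairs stack true indou esc rest
    else if ch = '"' then pvLoopA (idx+1) pairs stack insin true esc rest
    else if ch = '(' then pvLoopA (idx+1) pairs (idx :: stack) insin indou esc rest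
    else if ch = ')' then
      match stack with
      | [] => pvLoopA (idx+1) pairs stack insin indou esc rest
      | open_idx :: stack' => pvLoopA (idx+1) (pairs ++ [(open_idx, idx)]) stack' insin indou esc rest
    else pvLoopA (idx+1) pairs stack insin indou esc rest

def scan_parentheses_pairs_py (text : String) : List (Int × Int) :=
  pvLoopA 0 [] [] false false false text.toList

-- ===== PORT B =====
-- Pass 1 of Source B: the outer while loop (pvLexB) and the inner string-consuming
-- while loop (pvConsumeB) produce the per-position code mask.
mutual
def pvLexB : List Char → List Bool
  | [] => []
  | ch :: rest =>
    if ch = '\'' ∨ ch = '"' then true :: pvConsumeB ch rest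
    else true :: pvLexB rest

def pvConsumeB (q : Char) : List Char → List Bool
  | [] => []
  | c :: rest =>
    if c = '\\' then
      match rest with
      | [] => [false]
      | _ :: rest' => false :: false :: pvConsumeB q rest'
    else if c = q then false :: pvLexB rest
    else false :: pvConsumeB q rest
end

-- Pass 2 of Source B: for i,(keep,ch) in enumerate(zip(mask,text)) with a stack.
def pvLoopB (i : Int) (pairs : List (Int × Int)) (stack : List Int) :
    List (Bool × Char) → List (Int × Int)
  | [] => pairs
  | (keep, ch) :: rest =>
    if keep then
      if ch = '(' then pvLoopB (i+1) pairs (i :: stack) rest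
      else if ch = ')' then
        match stack with
        | [] => pvLoopB (i+1) pairs stack rest
        | o :: stack' => pvLoopB (i+1) (pairs ++ [(o, i)]) stack' rest
      else pvLoopB (i+1) pairs stack rest
    else pvLoopB (i+1) pairs stack rest

def scan_parentheses_pairs_py_alt (text : String) : List (Int × Int) :=
  pvLoopB 0 [] [] ((pvLexB text.toList).zip text.toList)

-- ===== PRECONDITION & SPEC =====
def Spec_scan_parentheses_pairs_py (text : String) (out : List (Int × Int)) : Prop := out = scan_parentheses_pairs_py_alt text
instance (text : String) (out : List (Int × Int)) : Decidable (Spec_scan_parentheses_pairs_py text out) := by unfold Spec_scan_parentheses_pairs_py; infer_instance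

-- ===== CLAIM (what is proved, stated in full; the proofs are below) =====
def Claim_equal_scan_parentheses_pairs_py : Prop := ∀ (text : String), Dom_scan_parentheses_pairs_py text → Spec_scan_parentheses_pairs_py text (scan_parentheses_pairs_py text)

-- ===== LEMMAS AND PROOFS =====

-- Combined invariant: outside a string A's loop agrees with B's loop fed pvLexB's mask;
-- inside a single-/double-quoted string (escape flag clear) it agrees with pvConsumeB's mask.
lemma pv_main : ∀ (n : Nat) (cs : List Char), cs.length ≤ n → ∀ (idx : Int) (pairs : List (Int × Int)) (stack : List Int),
    (pvLoopA idx pairs stack false false false cs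
      = pvLoopB idx pairs stack ((pvLexB cs).zip cs))
    ∧ (pvLoopA idx pairs stack true false false cs
      = pvLoopB idx pairs stack ((pvConsumeB '\'' cs).zip cs))
    ∧ (pvLoopA idx pairs stack false true false cs
      = pvLoopB idx pairs stack ((pvConsumeB '"' cs).zip cs)) := by
  intro n
  induction n with
  | zero =>
    intro cs hcs idx pairs stack
    have : cs = [] := List.eq_nil_of_length_eq_zero (Nat.le_zero.mp hcs)
    subst this
    simp [pvLoopA, pvLoopB, pvLexB, pvConsumeB]
  | succ n ih =>
    intro cs hcs idx pairs stack
    match cs with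
    | [] => simp [pvLoopA, pvLoopB, pvLexB, pvConsumeB]
    | ch :: rest =>
      have hr : rest.length ≤ n := by
        simpa using Nat.lt_succ_iff.mp (Nat.lt_of_lt_of_le (by simp) hcs)
      refine ⟨?_, ?_, ?_⟩
      · -- code state
        by_cases h1 : ch = '\''
        · subst h1
          simpa [pvLoopA, pvLexB, pvConsumeB, pvLoopB] using (ih rest hr (idx+1) pairs stack).2.1
        · by_cases h2 : ch = '"'
          · subst h2
            simpa [pvLoopA, pvLexB, pvConsumeB, pvLoopB, h1] using (ih rest hr (idx+1) pairs stack).2.2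
          · by_cases h3 : ch = '('
            · subst h3
              simpa [pvLoopA, pvLexB, pvConsumeB, pvLoopB] using (ih rest hr (idx+1) pairs (idx :: stack)).1
            · by_cases h4 : ch = ')'
              · subst h4
                match stack with
                | [] =>
                  simpa [pvLoopA, pvLexB, pvConsumeB, pvLoopB] using (ih rest hr (idx+1) pairs []).1
                | o :: stack' =>
                  simpa [pvLoopA, pvLexB, pvConsumeB, pvLoopB] using (ih rest hr (idx+1) (pairs ++ [(o, idx)]) stack').1
              · simpa [pvLoopA, pvLexB, pvConsumeB, pvLoopB, h1, h2, h3, h4] using (ih rest hr (idx+1) pairs stack).1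
      · -- inside a single-quoted string
        by_cases h1 : ch = '\\'
        · subst h1
          match rest with
          | [] => simp [pvLoopA, pvConsumeB, pvLoopB]
          | c :: rest' =>
            have hr' : rest'.length ≤ n := by
              have : rest'.length < (c :: rest').length := by simp
              omega
            simpa [pvLoopA, pvLexB, pvConsumeB, pvLoopB] using (ih rest' hr' (idx+1+1) pairs stack).2.1
        · by_cases h2 : ch = '\''
          · subst h2
            rw [pvConsumeB.eq_def]
            simpa [pvLoopA, pvLexB, pvLoopB] using (ih rest hr (idx+1) pairs stack).1
          · rw [pvConsumeB.eq_def]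
            simpa [pvLoopA, pvLexB, pvLoopB, h1, h2] using (ih rest hr (idx+1) pairs stack).2.1
      · -- inside a double-quoted string
        by_cases h1 : ch = '\\'
        · subst h1
          match rest with
          | [] => simp [pvLoopA, pvConsumeB, pvLoopB]
          | c :: rest' =>
            have hr' : rest'.length ≤ n := by
              have : rest'.length < (c :: rest').length := by simp
              omega
            simpa [pvLoopA, pvLexB, pvConsumeB, pvLoopB] using (ih rest' hr' (idx+1+1) pairs stack).2.2
        · by_cases h2 : ch = '"'
          · subst h2
            rw [pvConsumeB.eq_def]
            simpa [pvLoopA, pvLexB, pvLoopB] using (ih rest hr (idx+1) pairs stack).1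
          · rw [pvConsumeB.eq_def]
            simpa [pvLoopA, pvLexB, pvLoopB, h1, h2] using (ih rest hr (idx+1) pairs stack).2.2

-- ===== VERDICT (by name: the statement is the Claim_ definition above) =====
theorem scan_parentheses_pairs_py_spec : Claim_equal_scan_parentheses_pairs_py := by
  intro text _
  unfold Spec_scan_parentheses_pairs_py scan_parentheses_pairs_py scan_parentheses_pairs_py_alt
  exact (pv_main text.toList.length text.toList le_rfl 0 [] []).1
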